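-- pv_equiv track=rewrite | github.com/nananapo/atcoder | arc142/A/py.py | solve
-- ===== SOURCE A (Python) =====
-- def ret(x):
--     tmp = x
--     r = 0
--     while tmp != 0:
--         r = r * 10 + tmp % 10
--         tmp //= 10
--     return r
--
-- def f(x):
--     check = set()
--     while x not in check:
--         check.add(x)
--         x = ret(x)
--     return min(check)
--
-- def solve(t, n, opt):
--     if t % 10 == 0:
--         return 0
--     r = 0
--     while t <= n:
--         if f(t) == opt:
--             r += 1
--         t *= 10
--     return r
-- ===== SOURCE B (Python) =====
-- def numlen(x):
--     d = 0
--     while x > 0: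
--         d += 1
--         x //= 10
--     return d
--
--
-- def solve(t, n, opt):
--     if t % 10 == 0 or n < t:
--         return 0
--     rev, x = 0, t
--     while x > 0:
--         rev = rev * 10 + x % 10
--         x //= 10
--     if min(t, rev) != opt:
--         return 0
--     d = numlen(n) - numlen(t)
--     return d + 1 if t * 10 ** d <= n else d
-- ===== Notes on version B (the rewrite author's own statement) =====
-- stated objective: simpler
-- what changed: B replaces A's multiply-by-10 loop that recomputes the set-based reverse-orbit minimum at every shift with one digit reversal (the orbit minimum min(t, reverse t) is invariant under appending zeros) and a closed-form count of the shifts t*10^k <= n from the digit lengths of t and n.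
import Mathlib
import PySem

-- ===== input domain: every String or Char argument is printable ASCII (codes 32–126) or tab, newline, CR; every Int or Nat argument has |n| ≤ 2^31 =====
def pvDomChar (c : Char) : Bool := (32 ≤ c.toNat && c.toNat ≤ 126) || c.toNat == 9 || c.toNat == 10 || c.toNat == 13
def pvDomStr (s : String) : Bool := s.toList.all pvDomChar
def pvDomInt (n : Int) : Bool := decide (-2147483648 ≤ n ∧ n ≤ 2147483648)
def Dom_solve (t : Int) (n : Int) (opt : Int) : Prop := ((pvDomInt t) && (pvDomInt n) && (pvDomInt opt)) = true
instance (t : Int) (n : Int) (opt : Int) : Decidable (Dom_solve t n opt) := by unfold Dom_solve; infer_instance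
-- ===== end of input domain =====

-- B replaces A's multiply loop with repeated set-based orbit minima by one digit
-- reversal and a closed-form digit-length count of the shifts t*10^k ≤ n.
-- ===== PORT A =====

-- A's ret: 'while tmp != 0'. For tmp < 0 the Python loop never terminates
-- (-1 // 10 = -1), hence the 'tmp < 0 → r' totality guard (outside Pre_).
def retA (tmp r : Int) : Int :=
  if tmp = 0 then r
  else if tmp < 0 then r
  else retA (PySem.Int.floordiv tmp 10) (r * 10 + PySem.Int.mod tmp 10)
termination_by tmp.toNat
decreasing_by
  have h10 : (0:Int) < 10 := by norm_num
  rw [PySem.Int.floordiv_eq_ediv_of_pos h10]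
  omega

-- A's f: 'while x not in check: check.add(x); x = ret(x); return min(check)'.
-- Fuel only makes the loop total; it is generous (the orbit repeats within 3 steps).
def fLoop : Nat → Int → PySem.Set Int → Int
  | 0, _, check => (PySem.List.min? check (fun v => v)).getD 0
  | fuel + 1, x, check =>
      if PySem.Set.contains check x then (PySem.List.min? check (fun v => v)).getD 0
      else fLoop fuel (retA x 0) (PySem.Set.add check x)

def fA (x : Int) : Int := fLoop (x.natAbs + 4) x PySem.Set.empty

-- A's main loop: 'while t <= n: if f(t) == opt: r += 1; t *= 10'.
-- For t ≤ 0 ≤ n - t the Python loop never terminates; '0 < t' is the totality guard.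
def solveLoop (n opt t r : Int) : Int :=
  if t ≤ n then
    if 0 < t then solveLoop n opt (t * 10) (r + if fA t = opt then 1 else 0)
    else r
  else r
termination_by (n + 1 - t).toNat
decreasing_by omega

def solve (t : Int) (n : Int) (opt : Int) : Int :=
  if PySem.Int.mod t 10 = 0 then 0 else solveLoop n opt t 0

-- ===== PORT B =====

-- Source B numlen: 'while x > 0: d += 1; x //= 10'
def numlenB (x : Int) : Int :=
  if 0 < x then numlenB (PySem.Int.floordiv x 10) + 1 else 0
termination_by x.toNat
decreasing_by
  have h10 : (0:Int) < 10 := by norm_num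
  rw [PySem.Int.floordiv_eq_ediv_of_pos h10]
  omega

-- Source B reversal loop: 'while x > 0: rev = rev*10 + x%10; x //= 10'
def revB (x rev : Int) : Int :=
  if 0 < x then revB (PySem.Int.floordiv x 10) (rev * 10 + PySem.Int.mod x 10) else rev
termination_by x.toNat
decreasing_by
  have h10 : (0:Int) < 10 := by norm_num
  rw [PySem.Int.floordiv_eq_ediv_of_pos h10]
  omega

-- 10 ** d in Source B is only reached with d ≥ 0 (then t ≤ n forces numlen t ≤ numlen n);
-- d.toNat is exact there.
def solve_alt (t : Int) (n : Int) (opt : Int) : Int :=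
  if PySem.Int.mod t 10 = 0 ∨ n < t then 0
  else
    let rev := revB t 0
    if min t rev ≠ opt then 0
    else
      let d := numlenB n - numlenB t
      if t * 10 ^ d.toNat ≤ n then d + 1 else d

-- ===== PRECONDITION & SPEC =====
-- Pre_ excludes only inputs where A never returns: for t < 0 with t % 10 ≠ 0 and
-- t ≤ n, A's loops run forever (t *= 10 stays ≤ n; ret loops on negatives).
def Pre_solve (t : Int) (n : Int) (opt : Int) : Prop :=
  PySem.Int.mod t 10 = 0 ∨ 0 ≤ t ∨ n < t
instance (t : Int) (n : Int) (opt : Int) : Decidable (Pre_solve t n opt) := by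
  unfold Pre_solve; infer_instance

def pvWitness_solve : Int × Int × Int := (13, 2000, 13)

def Spec_solve (t : Int) (n : Int) (opt : Int) (out : Int) : Prop := out = solve_alt t n opt
instance (t : Int) (n : Int) (opt : Int) (out : Int) : Decidable (Spec_solve t n opt out) := by
  unfold Spec_solve; infer_instance

-- ===== CLAIM (what is proved, stated in full; the proofs are below) =====
def Claim_equal_solve : Prop := ∀ (t : Int) (n : Int) (opt : Int), Dom_solve t n opt → Pre_solve t n opt → Spec_solve t n opt (solve t n opt)

-- ===== LEMMAS AND PROOFS =====

-- Mathematical (Nat) models of the two digit loops.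
def natRev (x acc : Nat) : Nat :=
  if x = 0 then acc else natRev (x / 10) (acc * 10 + x % 10)
termination_by x
decreasing_by omega

def natLen (x : Nat) : Nat := if x = 0 then 0 else natLen (x / 10) + 1
termination_by x
decreasing_by omega

theorem retA_natCast (a : Nat) : ∀ b : Nat, retA (a : Int) (b : Int) = (natRev a b : Int) := by
  induction a using Nat.strong_induction_on with
  | _ a IH =>
    intro b
    rw [retA, natRev]
    rcases Nat.eq_zero_or_pos a with ha | ha
    · simp [ha]
    · rw [if_neg (by omega : ¬((a : Int) = 0)), if_neg (by omega : ¬((a : Int) < 0))]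
      have hfd : PySem.Int.floordiv ((a:Nat) : Int) 10 = ((a / 10 : Nat) : Int) := by
        exact_mod_cast PySem.Int.floordiv_natCast a 10
      have hmd : PySem.Int.mod ((a:Nat) : Int) 10 = ((a % 10 : Nat) : Int) := by
        exact_mod_cast PySem.Int.mod_natCast a 10
      rw [hfd, hmd]
      have hcast : (b : Int) * 10 + ((a % 10 : Nat) : Int) = ((b * 10 + a % 10 : Nat) : Int) := by
        push_cast; ring
      rw [hcast, IH (a / 10) (by omega), if_neg (by omega : ¬(a = 0))]

theorem retA_eq_natRev (x r : Int) (hx : 0 ≤ x) (hr : 0 ≤ r) :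
    retA x r = (natRev x.toNat r.toNat : Int) := by
  have h := retA_natCast x.toNat r.toNat
  rwa [Int.toNat_of_nonneg hx, Int.toNat_of_nonneg hr] at h

theorem revB_natCast (a : Nat) : ∀ b : Nat, revB (a : Int) (b : Int) = (natRev a b : Int) := by
  induction a using Nat.strong_induction_on with
  | _ a IH =>
    intro b
    rw [revB, natRev]
    rcases Nat.eq_zero_or_pos a with ha | ha
    · simp [ha]
    · rw [if_pos (by omega : (0:Int) < (a:Int))]
      have hfd : PySem.Int.floordiv ((a:Nat) : Int) 10 = ((a / 10 : Nat) : Int) := by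
        exact_mod_cast PySem.Int.floordiv_natCast a 10
      have hmd : PySem.Int.mod ((a:Nat) : Int) 10 = ((a % 10 : Nat) : Int) := by
        exact_mod_cast PySem.Int.mod_natCast a 10
      rw [hfd, hmd]
      have hcast : (b : Int) * 10 + ((a % 10 : Nat) : Int) = ((b * 10 + a % 10 : Nat) : Int) := by
        push_cast; ring
      rw [hcast, IH (a / 10) (by omega), if_neg (by omega : ¬(a = 0))]

theorem revB_eq_natRev (x r : Int) (hx : 0 ≤ x) (hr : 0 ≤ r) :
    revB x r = (natRev x.toNat r.toNat : Int) := by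
  have h := revB_natCast x.toNat r.toNat
  rwa [Int.toNat_of_nonneg hx, Int.toNat_of_nonneg hr] at h

theorem numlenB_natCast (a : Nat) : numlenB (a : Int) = (natLen a : Int) := by
  induction a using Nat.strong_induction_on with
  | _ a IH =>
    rw [numlenB, natLen]
    rcases Nat.eq_zero_or_pos a with ha | ha
    · simp [ha]
    · rw [if_pos (by omega : (0:Int) < (a:Int))]
      have hfd : PySem.Int.floordiv ((a:Nat) : Int) 10 = ((a / 10 : Nat) : Int) := by
        exact_mod_cast PySem.Int.floordiv_natCast a 10
      rw [hfd, IH (a / 10) (by omega), if_neg (by omega : ¬(a = 0))]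
      push_cast; ring

theorem numlenB_eq_natLen (x : Int) (hx : 0 ≤ x) : numlenB x = (natLen x.toNat : Int) := by
  have h := numlenB_natCast x.toNat
  rwa [Int.toNat_of_nonneg hx] at h

theorem natLen_eq_digits (m : Nat) : natLen m = (Nat.digits 10 m).length := by
  induction m using Nat.strong_induction_on with
  | _ m IH =>
    rw [natLen]
    rcases Nat.eq_zero_or_pos m with hm | hm
    · simp [hm]
    · rw [if_neg (by omega), Nat.digits_def' (by norm_num : 1 < 10) hm]
      simp [IH (m / 10) (by omega)]

theorem natRev_acc (m : Nat) : ∀ acc : Nat,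
    natRev m acc = Nat.ofDigits 10 (Nat.digits 10 m).reverse + acc * 10 ^ (Nat.digits 10 m).length := by
  induction m using Nat.strong_induction_on with
  | _ m IH =>
    intro acc
    rw [natRev]
    rcases Nat.eq_zero_or_pos m with hm | hm
    · simp [hm]
    · rw [if_neg (by omega), IH (m / 10) (by omega),
        Nat.digits_def' (by norm_num : 1 < 10) hm]
      simp only [List.reverse_cons, Nat.ofDigits_append, List.length_reverse,
        Nat.ofDigits_singleton, List.length_cons]
      ring

theorem natRev_zero_acc (m : Nat) : natRev m 0 = Nat.ofDigits 10 (Nat.digits 10 m).reverse := by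
  rw [natRev_acc]; simp

theorem natRev_inv (m : Nat) (hm : m % 10 ≠ 0) : natRev (natRev m 0) 0 = m := by
  have hmpos : 0 < m := by omega
  rw [natRev_zero_acc, natRev_zero_acc]
  have hdig : Nat.digits 10 (Nat.ofDigits 10 (Nat.digits 10 m).reverse)
      = (Nat.digits 10 m).reverse := by
    refine Nat.digits_ofDigits 10 (by norm_num) _ (fun l hl => ?_) (fun h => ?_)
    · exact Nat.digits_lt_base (by norm_num) (List.mem_reverse.mp hl)
    · have hd : Nat.digits 10 m = m % 10 :: Nat.digits 10 (m / 10) :=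
        Nat.digits_def' (by norm_num) hmpos
      have hrev : (Nat.digits 10 m).reverse = (Nat.digits 10 (m / 10)).reverse ++ [m % 10] := by
        rw [hd]; simp
      have h9 : (Nat.digits 10 m).reverse.getLast? = some (m % 10) := by
        rw [hrev]; simp
      have h10 := List.getLast?_eq_getLast (l := (Nat.digits 10 m).reverse) h
      rw [h10] at h9
      intro h0
      rw [h0] at h9
      exact hm (Option.some.inj h9).symm
  rw [hdig, List.reverse_reverse, Nat.ofDigits_digits]

theorem natRev_mul10 (m : Nat) : natRev (10 * m) 0 = natRev m 0 := by
  rcases Nat.eq_zero_or_pos m with hm | hm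
  · simp [hm]
  · conv_lhs => rw [natRev]
    rw [if_neg (by omega)]
    have h1 : 10 * m / 10 = m := by omega
    have h2 : 10 * m % 10 = 0 := by omega
    rw [h1, h2]

theorem natRev_acc_pos (m : Nat) : ∀ acc : Nat, 1 ≤ m → 1 ≤ natRev m acc := by
  induction m using Nat.strong_induction_on with
  | _ m IH =>
    intro acc hm
    rw [natRev, if_neg (by omega)]
    rcases Nat.eq_zero_or_pos (m / 10) with h | h
    · have hz : natRev 0 (acc * 10 + m % 10) = acc * 10 + m % 10 := by
        rw [natRev]; simp
      rw [h, hz]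
      omega
    · exact IH (m / 10) (by omega) _ h

theorem natRev_pos (m : Nat) (hm : 1 ≤ m) : 1 ≤ natRev m 0 := natRev_acc_pos m 0 hm

theorem natRev_strip (m : Nat) (hm : 1 ≤ m) :
    ∃ z, (natRev (natRev m 0) 0) * 10 ^ z = m ∧ natRev (natRev (natRev m 0) 0) 0 = natRev m 0 := by
  induction m using Nat.strong_induction_on with
  | _ m IH =>
    by_cases hd : m % 10 = 0
    · have hm10 : 10 * (m / 10) = m := by omega
      have hq : 1 ≤ m / 10 := by omega
      have hr : natRev m 0 = natRev (m / 10) 0 := by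
        conv_lhs => rw [← hm10]
        exact natRev_mul10 _
      obtain ⟨z, hz1, hz2⟩ := IH (m / 10) (by omega) hq
      refine ⟨z + 1, ?_, ?_⟩
      · rw [hr, pow_succ]
        calc natRev (natRev (m / 10) 0) 0 * (10 ^ z * 10)
            = natRev (natRev (m / 10) 0) 0 * 10 ^ z * 10 := by ring
          _ = m / 10 * 10 := by rw [hz1]
          _ = m := by omega
      · rw [hr, hz2]
    · exact ⟨0, by rw [natRev_inv m hd]; omega, by rw [natRev_inv m hd]⟩

-- Evaluation of A's f on positive input: the orbit min is min(strip, reverse).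
theorem fA_eval (x : Int) (hx : 1 ≤ x) :
    fA x = min (retA (retA x 0) 0) (retA x 0) := by
  set u := retA x 0 with hu
  set s := retA u 0 with hs
  have ha1 : 1 ≤ x.toNat := by omega
  have huv : u = ((natRev x.toNat 0 : Nat) : Int) := by
    rw [hu]; simpa using retA_eq_natRev x 0 (by omega) le_rfl
  have hu1 : 1 ≤ u := by
    rw [huv]; exact_mod_cast natRev_pos _ ha1
  have hsv : s = ((natRev (natRev x.toNat 0) 0 : Nat) : Int) := by
    rw [hs, huv, retA_eq_natRev _ 0 (by positivity) le_rfl]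
    simp
  have hs1 : 1 ≤ s := by
    rw [hsv]; exact_mod_cast natRev_pos _ (natRev_pos _ ha1)
  obtain ⟨z, hz1, hz2⟩ := natRev_strip x.toNat ha1
  have hsx : s ≤ x := by
    have h1 : natRev (natRev x.toNat 0) 0 ≤ x.toNat := by
      calc natRev (natRev x.toNat 0) 0
          ≤ natRev (natRev x.toNat 0) 0 * 10 ^ z :=
            Nat.le_mul_of_pos_right _ (Nat.pow_pos (by norm_num))
        _ = x.toNat := hz1
    rw [hsv]
    omega
  have hrs : retA s 0 = u := by
    rw [hsv, retA_eq_natRev _ 0 (by positivity) le_rfl]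
    simp only [Int.toNat_natCast, Int.toNat_zero]
    rw [hz2, ← huv]
  have key : ∀ k : Nat, fLoop (k + 4) x PySem.Set.empty = min s u := by
    intro k
    have hc0 : PySem.Set.contains (PySem.Set.empty : PySem.Set Int) x = false := by
      simp [PySem.Set.contains, PySem.Set.empty]
    show fLoop (k + 3 + 1) x PySem.Set.empty = min s u
    rw [fLoop, hc0]
    simp only [Bool.false_eq_true, if_false]
    have hadd0 : PySem.Set.add (PySem.Set.empty : PySem.Set Int) x = [x] := by
      simp [PySem.Set.add, hc0, PySem.Set.empty]
    rw [hadd0, ← hu]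
    by_cases hux : u = x
    · have hc1 : PySem.Set.contains ([x] : PySem.Set Int) u = true := by
        simp [PySem.Set.contains, hux]
      rw [fLoop, hc1]
      simp only [if_true]
      have hmin : (PySem.List.min? ([x] : List Int) (fun v => v)) = some x := by
        rw [PySem.List.min?_id_cons]; simp
      rw [hmin]
      have hsx' : s = x := by rw [hs, hux, ← hu, hux]
      rw [hsx', hux]
      simp
    · have hc1 : PySem.Set.contains ([x] : PySem.Set Int) u = false := by
        simp [PySem.Set.contains, hux]
      rw [fLoop, hc1]
      simp only [Bool.false_eq_true, if_false]
      have hadd1 : PySem.Set.add ([x] : PySem.Set Int) u = [x, u] := by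
        simp [PySem.Set.add, hc1, hux]
      rw [hadd1, ← hs]
      by_cases hsxu : s = x ∨ s = u
      · have hc2 : PySem.Set.contains ([x, u] : PySem.Set Int) s = true := by
        -- s is x or u
          rcases hsxu with h | h <;> simp [PySem.Set.contains, h]
        rw [fLoop, hc2]
        simp only [if_true]
        have hmin : (PySem.List.min? ([x, u] : List Int) (fun v => v)) = some (min x u) := by
          rw [PySem.List.min?_id_cons]; simp
        rw [hmin]
        rcases hsxu with h | h
        · rw [h]
          simp [min_comm]
        · rw [h]
          have : min x u = u := min_eq_right (by omega)
          simp [this]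
      · push_neg at hsxu
        have hc2 : PySem.Set.contains ([x, u] : PySem.Set Int) s = false := by
          simp [PySem.Set.contains, hsxu.1, hsxu.2]
        rw [fLoop, hc2]
        simp only [Bool.false_eq_true, if_false]
        have hadd2 : PySem.Set.add ([x, u] : PySem.Set Int) s = [x, u, s] := by
          simp [PySem.Set.add, hc2, hsxu.1, hsxu.2]
        rw [hadd2, hrs]
        have hc3 : PySem.Set.contains ([x, u, s] : PySem.Set Int) u = true := by
          simp [PySem.Set.contains]
        rw [fLoop, hc3]
        simp only [if_true]
        have hmin : (PySem.List.min? ([x, u, s] : List Int) (fun v => v))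
            = some (min (min x u) s) := by
          rw [PySem.List.min?_id_cons]; simp
        rw [hmin]
        simp only [Option.getD_some]
        rcases le_total x u with h | h <;> rcases le_total s u with h' | h' <;>
          simp [min_def] <;> omega
  rw [fA]
  exact key x.natAbs

theorem fA_mul10 (x : Int) (hx : 1 ≤ x) : fA (x * 10) = fA x := by
  have h1 : retA (x * 10) 0 = retA x 0 := by
    rw [retA_eq_natRev (x * 10) 0 (by omega) le_rfl, retA_eq_natRev x 0 (by omega) le_rfl]
    have h2 : (x * 10).toNat = 10 * x.toNat := by omega
    simp only [Int.toNat_zero]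
    rw [h2, natRev_mul10]
  rw [fA_eval (x * 10) (by omega), h1, fA_eval x hx]

-- Proof-side counter for A's loop.
def cntI (n t : Int) : Int :=
  if 0 < t ∧ t ≤ n then cntI n (t * 10) + 1 else 0
termination_by (n + 1 - t).toNat
decreasing_by omega

theorem solveLoop_eq_cntI_aux (n opt : Int) : ∀ (k : Nat) (t r : Int),
    (n + 1 - t).toNat = k → 1 ≤ t →
    solveLoop n opt t r = r + (if fA t = opt then cntI n t else 0) := by
  intro k
  induction k using Nat.strong_induction_on with
  | _ k IH =>
    intro t r hk ht
    rw [solveLoop]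
    by_cases h1 : t ≤ n
    · rw [if_pos h1, if_pos (by omega : (0:Int) < t),
        IH (n + 1 - t * 10).toNat (by omega) (t * 10) _ rfl (by omega),
        fA_mul10 t ht,
        show cntI n t = cntI n (t * 10) + 1 from by
          conv_lhs => rw [cntI]
          rw [if_pos ⟨by omega, h1⟩]]
      split_ifs with hf <;> ring
    · rw [if_neg h1,
        show cntI n t = 0 from by rw [cntI, if_neg (by omega : ¬((0:Int) < t ∧ t ≤ n))]]
      simp

theorem solveLoop_eq_cntI (n opt : Int) (t r : Int) (ht : 1 ≤ t) :
    solveLoop n opt t r = r + (if fA t = opt then cntI n t else 0) :=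
  solveLoop_eq_cntI_aux n opt (n + 1 - t).toNat t r rfl ht

theorem natLen_pos (a : Nat) (ha : 1 ≤ a) : 1 ≤ natLen a := by
  rw [natLen, if_neg (by omega)]; omega

theorem natLen_upper (a : Nat) : a < 10 ^ natLen a := by
  rw [natLen_eq_digits]
  exact Nat.lt_base_pow_length_digits (by norm_num)

theorem natLen_lower (a : Nat) (ha : 1 ≤ a) : 10 ^ (natLen a - 1) ≤ a := by
  have h := Nat.base_pow_length_digits_le 10 a (by norm_num) (by omega)
  rw [← natLen_eq_digits] at h
  have hp : 1 ≤ natLen a := natLen_pos a ha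
  have : (10:Nat) ^ natLen a = 10 * 10 ^ (natLen a - 1) := by
    rw [← pow_succ']
    congr 1
    omega
  exact Nat.le_of_mul_le_mul_left (by rw [← this]; exact h) (by norm_num)

theorem natLen_mono {a b : Nat} (h : a ≤ b) : natLen a ≤ natLen b := by
  rcases Nat.eq_zero_or_pos a with ha | ha
  · rw [ha, natLen]; simp
  · by_contra hlt
    push_neg at hlt
    have h1 : 10 ^ (natLen a - 1) ≤ a := natLen_lower a ha
    have h2 : b < 10 ^ natLen b := natLen_upper b
    have h3 : (10:Nat) ^ natLen b ≤ 10 ^ (natLen a - 1) :=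
      Nat.pow_le_pow_right (by norm_num) (by omega)
    omega

theorem cntI_formula_aux (n : Int) : ∀ (k : Nat) (t : Int),
    (n + 1 - t).toNat = k → 1 ≤ t → t ≤ n →
    cntI n t = ((natLen n.toNat - natLen t.toNat : Nat) : Int) +
      (if t * 10 ^ (natLen n.toNat - natLen t.toNat) ≤ n then 1 else 0) := by
  intro k
  induction k using Nat.strong_induction_on with
  | _ k IH =>
    intro t hk ht htn
    have hmono : natLen t.toNat ≤ natLen n.toNat := natLen_mono (by omega)
    rw [cntI, if_pos ⟨by omega, htn⟩]
    have hlen10 : natLen ((t * 10).toNat) = natLen t.toNat + 1 := by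
      have h1 : (t * 10).toNat = 10 * t.toNat := by omega
      rw [h1, natLen, if_neg (by omega),
        show 10 * t.toNat / 10 = t.toNat from by omega]
    by_cases h2 : t * 10 ≤ n
    · rw [IH (n + 1 - t * 10).toNat (by omega) (t * 10) rfl (by omega) h2, hlen10]
      have hm2 : natLen t.toNat + 1 ≤ natLen n.toNat := by
        have h3 := natLen_mono (a := (t * 10).toNat) (b := n.toNat) (by omega)
        rwa [hlen10] at h3
      have he : natLen n.toNat - natLen t.toNat
          = (natLen n.toNat - (natLen t.toNat + 1)) + 1 := by omega
      rw [he]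
      have hml : t * 10 * (10:Int) ^ (natLen n.toNat - (natLen t.toNat + 1))
          = t * (10:Int) ^ ((natLen n.toNat - (natLen t.toNat + 1)) + 1) := by
        rw [pow_succ]; ring
      rw [hml]
      push_cast
      split_ifs with hc <;> ring
    · have hcz : cntI n (t * 10) = 0 := by
        rw [cntI, if_neg (by omega)]
      rw [hcz]
      have hup : n.toNat < 10 ^ natLen n.toNat := natLen_upper _
      have hlow : 10 ^ (natLen n.toNat - 1) ≤ n.toNat := natLen_lower _ (by omega)
      have hup_t : t.toNat < 10 ^ natLen t.toNat := natLen_upper _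
      have hLb1 : natLen n.toNat ≤ natLen t.toNat + 1 := by
        by_contra hc
        have h3 : (10:Nat) ^ (natLen t.toNat + 1) ≤ 10 ^ (natLen n.toNat - 1) :=
          Nat.pow_le_pow_right (by norm_num) (by omega)
        have h4 : n.toNat < 10 * t.toNat := by omega
        have h5 : 10 * t.toNat < 10 * 10 ^ natLen t.toNat := by omega
        have h6 : (10:Nat) * 10 ^ natLen t.toNat = 10 ^ (natLen t.toNat + 1) :=
          (pow_succ' 10 (natLen t.toNat)).symm
        omega
      rcases (by omega : natLen n.toNat - natLen t.toNat = 0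
          ∨ natLen n.toNat - natLen t.toNat = 1) with h | h
      · rw [h, pow_zero, mul_one, if_pos htn]
        norm_num
      · rw [h, pow_one, if_neg (by omega)]
        norm_num

theorem cntI_formula (n t : Int) (ht : 1 ≤ t) (htn : t ≤ n) :
    cntI n t = ((natLen n.toNat - natLen t.toNat : Nat) : Int) +
      (if t * 10 ^ (natLen n.toNat - natLen t.toNat) ≤ n then 1 else 0) :=
  cntI_formula_aux n (n + 1 - t).toNat t rfl ht htn

-- ===== VERDICT (by name: the statement is the Claim_ definition above) =====
theorem solve_spec : Claim_equal_solve := by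
  intro t n opt hdom hpre
  unfold Spec_solve
  by_cases hm : PySem.Int.mod t 10 = 0
  · have hA : solve t n opt = 0 := by rw [solve, if_pos hm]
    rw [hA, solve_alt, if_pos (Or.inl hm)]
  · by_cases hn : n < t
    · have hA : solve t n opt = 0 := by
        rw [solve, if_neg hm, solveLoop, if_neg (by omega)]
      rw [hA, solve_alt, if_pos (Or.inr hn)]
    · have ht0 : 0 ≤ t := by
        rcases hpre with h | h | h
        · exact absurd h hm
        · exact h
        · exact absurd h hn
      have ht1 : 1 ≤ t := by
        rcases eq_or_lt_of_le ht0 with h | h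
        · exfalso; apply hm; rw [← h]; decide
        · omega
      have hta : ((t.toNat : Nat) : Int) = t := Int.toNat_of_nonneg ht0
      have ha1 : 1 ≤ t.toNat := by omega
      have hmoda : t.toNat % 10 ≠ 0 := by
        intro hc
        apply hm
        rw [← hta, show ((10:Int)) = ((10:Nat) : Int) from by norm_num,
          PySem.Int.mod_natCast, hc]
        norm_num
      have hu : retA t 0 = ((natRev t.toNat 0 : Nat) : Int) := by
        simpa using retA_eq_natRev t 0 ht0 le_rfl
      have hrr : retA (retA t 0) 0 = t := by
        rw [hu, retA_eq_natRev _ 0 (by positivity) le_rfl]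
        simp only [Int.toNat_natCast, Int.toNat_zero]
        rw [natRev_inv t.toNat hmoda, hta]
      have hrev : revB t 0 = retA t 0 := by
        rw [hu, revB_eq_natRev t 0 ht0 le_rfl]
        simp
      have hfa : fA t = min t (retA t 0) := by
        rw [fA_eval t ht1, hrr]
      have hOr : ¬ (PySem.Int.mod t 10 = 0 ∨ n < t) := fun hc => hc.elim hm hn
      have hA : solve t n opt = if min t (retA t 0) = opt then cntI n t else 0 := by
        rw [solve, if_neg hm, solveLoop_eq_cntI n opt t 0 ht1, hfa, zero_add]
      rw [hA, solve_alt, if_neg hOr]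
      simp only [hrev]
      by_cases hop : min t (retA t 0) = opt
      · rw [if_pos hop, if_neg (by simp [hop])]
        have hmono : natLen t.toNat ≤ natLen n.toNat := natLen_mono (by omega)
        have hLb := numlenB_eq_natLen n (by omega)
        have hLa := numlenB_eq_natLen t ht0
        have hd : numlenB n - numlenB t
            = ((natLen n.toNat - natLen t.toNat : Nat) : Int) := by
          rw [hLb, hLa, Nat.cast_sub hmono]
        have hdt : (numlenB n - numlenB t).toNat
            = natLen n.toNat - natLen t.toNat := by
          rw [hd]; simp
        rw [hdt, hd, cntI_formula n t ht1 (by omega)]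
        split_ifs with hc <;> ring
      · rw [if_neg hop, if_pos (by simpa using hop)]
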